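-- pv_equiv track=rewrite | github.com/Qenszu/workshop | python/WDI/zestaw_3/105.py | zgodne
-- ===== SOURCE A (Python) =====
-- def zgodne(a, b):
--     suma = 0
--
--     while a != 0:
--         suma += a%2
--         a //= 2
--
--     while b != 0:
--         suma -= b%2
--         b //= 2
--
--     if suma == 0:
--         return True
--
--     return False
-- ===== SOURCE B (Python) =====
-- def zgodne(a, b):
--     suma = 0
--
--     while a != 0:
--         a &= a - 1
--         suma += 1
--
--     while b != 0:
--         b &= b - 1
--         suma -= 1
--
--     return suma == 0
-- ===== Notes on version B (the rewrite author's own statement) =====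
-- stated objective: idiomatic
-- what changed: Replaces the two per-bit-position halving loops (a%2 accumulation with a//=2) by Brian Kernighan's set-bit iteration (a &= a-1 clears the lowest set bit, one step per set bit), keeping the shared counter, and returns the comparison directly.
import Mathlib
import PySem

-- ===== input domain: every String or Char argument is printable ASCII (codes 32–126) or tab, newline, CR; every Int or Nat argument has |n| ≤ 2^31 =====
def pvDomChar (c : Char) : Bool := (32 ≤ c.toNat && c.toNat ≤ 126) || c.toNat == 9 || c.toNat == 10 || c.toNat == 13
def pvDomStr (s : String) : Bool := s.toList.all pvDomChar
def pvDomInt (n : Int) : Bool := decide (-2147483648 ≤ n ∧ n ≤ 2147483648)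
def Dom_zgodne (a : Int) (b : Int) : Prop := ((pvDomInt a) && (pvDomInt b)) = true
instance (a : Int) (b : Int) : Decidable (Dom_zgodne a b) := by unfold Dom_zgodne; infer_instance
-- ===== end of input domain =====

-- B replaces A's per-bit-position halving loops by Kernighan's set-bit iteration (a &= a-1); idiomatic, same shared-counter shape.
-- Both Pythons loop forever on a negative argument, so Pre_ restricts to nonnegative ints.

-- ===== PORT A =====
-- while a != 0: suma += a%2; a //= 2   (guard written 'a ≤ 0' so the Lean function is total; for 0 ≤ a it is exactly 'a ≠ 0')
def zgodneLoop1 (a : Int) (suma : Int) : Int :=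
  if _h : a ≤ 0 then suma
  else zgodneLoop1 (PySem.Int.floordiv a 2) (suma + PySem.Int.mod a 2)
termination_by a.toNat
decreasing_by
  rw [PySem.Int.floordiv_eq_ediv_of_pos (by omega)]; omega

-- while b != 0: suma -= b%2; b //= 2
def zgodneLoop2 (b : Int) (suma : Int) : Int :=
  if _h : b ≤ 0 then suma
  else zgodneLoop2 (PySem.Int.floordiv b 2) (suma - PySem.Int.mod b 2)
termination_by b.toNat
decreasing_by
  rw [PySem.Int.floordiv_eq_ediv_of_pos (by omega)]; omega

def zgodne (a : Int) (b : Int) : Bool :=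
  if zgodneLoop2 b (zgodneLoop1 a 0) = 0 then true else false

-- ===== PORT B =====
-- band a (a-1) < a for 0 < a (used for termination of both B loops)
theorem pvBandLt (a : Int) (h : ¬ a ≤ 0) : (PySem.Int.band a (a - 1)).toNat < a.toNat := by
  rw [PySem.Int.band_of_nonneg (by omega) (by omega)]
  have := Nat.and_le_right (n := a.toNat) (m := (a - 1).toNat)
  omega

-- while a != 0: a &= a-1; suma += 1
def zgodneAltLoop1 (a : Int) (suma : Int) : Int :=
  if _h : a ≤ 0 then suma
  else zgodneAltLoop1 (PySem.Int.band a (a - 1)) (suma + 1)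
termination_by a.toNat
decreasing_by exact pvBandLt a _h

-- while b != 0: b &= b-1; suma -= 1
def zgodneAltLoop2 (b : Int) (suma : Int) : Int :=
  if _h : b ≤ 0 then suma
  else zgodneAltLoop2 (PySem.Int.band b (b - 1)) (suma - 1)
termination_by b.toNat
decreasing_by exact pvBandLt b _h

def zgodne_alt (a : Int) (b : Int) : Bool :=
  decide (zgodneAltLoop2 b (zgodneAltLoop1 a 0) = 0)

-- ===== PRECONDITION & SPEC =====
-- Both A and B loop forever on a negative argument (floor division / & keep it negative), so Pre_ excludes negatives.
def Pre_zgodne (a : Int) (b : Int) : Prop := 0 ≤ a ∧ 0 ≤ b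
instance (a : Int) (b : Int) : Decidable (Pre_zgodne a b) := by unfold Pre_zgodne; infer_instance
def pvWitness_zgodne : Int × Int := (5, 3)

def Spec_zgodne (a : Int) (b : Int) (out : Bool) : Prop := out = zgodne_alt a b
instance (a : Int) (b : Int) (out : Bool) : Decidable (Spec_zgodne a b out) := by unfold Spec_zgodne; infer_instance

-- ===== CLAIM (what is proved, stated in full; the proofs are below) =====
def Claim_equal_zgodne : Prop := ∀ (a : Int) (b : Int), Dom_zgodne a b → Pre_zgodne a b → Spec_zgodne a b (zgodne a b)

-- ===== LEMMAS AND PROOFS =====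

-- A's first loop computes suma + popcount a
theorem zgodneLoop1_eq (n : Nat) : ∀ (a s : Int), a.toNat = n → 0 ≤ a →
    zgodneLoop1 a s = s + PySem.Int.bitCount a := by
  induction n using Nat.strong_induction_on with
  | _ n ih =>
    intro a s hn ha
    rw [zgodneLoop1]
    by_cases h : a ≤ 0
    · have : a = 0 := le_antisymm h ha
      simp [this]
    · have h2 : PySem.Int.floordiv a 2 = a / 2 := PySem.Int.floordiv_eq_ediv_of_pos (by omega)
      have hm : PySem.Int.mod a 2 = a % 2 := PySem.Int.mod_eq_emod_of_pos (by omega)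
      rw [dif_neg h, ih (PySem.Int.floordiv a 2).toNat (by rw [h2]; omega) _ _ rfl
            (by rw [h2]; omega),
          PySem.Int.bitCount_of_pos (show (0:Int) < a by omega), hm]
      push_cast
      omega

theorem zgodneLoop2_eq (n : Nat) : ∀ (b s : Int), b.toNat = n → 0 ≤ b →
    zgodneLoop2 b s = s - PySem.Int.bitCount b := by
  induction n using Nat.strong_induction_on with
  | _ n ih =>
    intro b s hn hb
    rw [zgodneLoop2]
    by_cases h : b ≤ 0
    · have : b = 0 := le_antisymm h hb
      simp [this]
    · have h2 : PySem.Int.floordiv b 2 = b / 2 := PySem.Int.floordiv_eq_ediv_of_pos (by omega)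
      have hm : PySem.Int.mod b 2 = b % 2 := PySem.Int.mod_eq_emod_of_pos (by omega)
      rw [dif_neg h, ih (PySem.Int.floordiv b 2).toNat (by rw [h2]; omega) _ _ rfl
            (by rw [h2]; omega),
          PySem.Int.bitCount_of_pos (show (0:Int) < b by omega), hm]
      push_cast
      omega

-- Kernighan's step on Nat: n &&& (n-1) clears exactly one set bit
theorem land_odd (m : Nat) : (2*m+1) &&& (2*m) = 2*m := by
  apply Nat.eq_of_testBit_eq
  intro i
  rw [Nat.testBit_land]
  cases i with
  | zero =>
    have : (2*m) % 2 = 0 := by omega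
    simp [this]
  | succ j =>
    have e1 : (2*m+1)/2 = m := by omega
    have e2 : (2*m)/2 = m := by omega
    simp only [Nat.testBit_succ]
    rw [e1, e2, Bool.and_self]
theorem land_even (m : Nat) (h : 0 < m) : (2*m) &&& (2*m-1) = 2*(m &&& (m-1)) := by
  apply Nat.eq_of_testBit_eq
  intro i
  rw [Nat.testBit_land]
  cases i with
  | zero =>
    have h1 : (2*m) % 2 = 0 := by omega
    have h2 : (2*(m &&& (m-1))) % 2 = 0 := by omega
    simp [h1, h2]
  | succ j =>
    have e1 : (2*m)/2 = m := by omega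
    have e2 : (2*m-1)/2 = m-1 := by omega
    have e3 : (2*(m &&& (m-1)))/2 = m &&& (m-1) := by omega
    simp only [Nat.testBit_succ]
    rw [e1, e2, e3, Nat.testBit_land]

theorem bc_two_mul (k : Nat) : PySem.Int.bitCount ((2*k : Nat) : Int) = PySem.Int.bitCount (k : Int) := by
  rcases Nat.eq_zero_or_pos k with h | h
  · subst h; norm_num
  · rw [PySem.Int.bitCount_natCast (show 0 < 2*k by omega)]
    have e : (2*k) % 2 = 0 := by omega
    have e2 : (2*k) / 2 = k := by omega
    rw [e, e2, Nat.zero_add]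

theorem nat_kern_bitcount (n : Nat) (h : 0 < n) :
    PySem.Int.bitCount ((n &&& (n - 1) : Nat) : Int) + 1 = PySem.Int.bitCount (n : Int) := by
  induction n using Nat.strong_induction_on with
  | _ n ih =>
    by_cases hodd : n % 2 = 1
    · have hn : n = 2*(n/2)+1 := by omega
      have h1 : n - 1 = 2*(n/2) := by omega
      rw [hn] at *
      rw [show 2*(n/2)+1-1 = 2*(n/2) by omega, land_odd, bc_two_mul,
          PySem.Int.bitCount_natCast (show 0 < 2*(n/2)+1 by omega)]
      have e : (2*(n/2)+1) % 2 = 1 := by omega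
      have e2 : (2*(n/2)+1) / 2 = n/2 := by omega
      rw [e, e2]; omega
    · have hm : 0 < n/2 := by omega
      have hn : n = 2*(n/2) := by omega
      rw [hn, show 2*(n/2)-1 = 2*(n/2)-1 from rfl, land_even (n/2) hm, bc_two_mul, bc_two_mul]
      exact ih (n/2) (by omega) hm


-- B's first loop computes suma + popcount a
theorem zgodneAltLoop1_eq (n : Nat) : ∀ (a s : Int), a.toNat = n → 0 ≤ a →
    zgodneAltLoop1 a s = s + PySem.Int.bitCount a := by
  induction n using Nat.strong_induction_on with
  | _ n ih =>
    intro a s hn ha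
    rw [zgodneAltLoop1]
    by_cases h : a ≤ 0
    · have : a = 0 := le_antisymm h ha
      simp [this]
    · have hlt := pvBandLt a h
      have hb : PySem.Int.band a (a - 1) = ((a.toNat &&& (a.toNat - 1) : Nat) : Int) := by
        rw [PySem.Int.band_of_nonneg (by omega) (by omega)]; congr 2; omega
      have hk := nat_kern_bitcount a.toNat (by omega)
      have hcast : ((a.toNat : Int)) = a := by omega
      rw [dif_neg h, ih (PySem.Int.band a (a - 1)).toNat (by omega) _ _ rfl
            (by rw [hb]; positivity)]
      rw [hb, ← hcast, ← hk]
      simp only [Int.toNat_natCast]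
      push_cast
      ring

theorem zgodneAltLoop2_eq (n : Nat) : ∀ (b s : Int), b.toNat = n → 0 ≤ b →
    zgodneAltLoop2 b s = s - PySem.Int.bitCount b := by
  induction n using Nat.strong_induction_on with
  | _ n ih =>
    intro b s hn hbnn
    rw [zgodneAltLoop2]
    by_cases h : b ≤ 0
    · have : b = 0 := le_antisymm h hbnn
      simp [this]
    · have hlt := pvBandLt b h
      have hb : PySem.Int.band b (b - 1) = ((b.toNat &&& (b.toNat - 1) : Nat) : Int) := by
        rw [PySem.Int.band_of_nonneg (by omega) (by omega)]; congr 2; omega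
      have hk := nat_kern_bitcount b.toNat (by omega)
      have hcast : ((b.toNat : Int)) = b := by omega
      rw [dif_neg h, ih (PySem.Int.band b (b - 1)).toNat (by omega) _ _ rfl
            (by rw [hb]; positivity)]
      rw [hb, ← hcast, ← hk]
      simp only [Int.toNat_natCast]
      push_cast
      ring

-- ===== VERDICT (by name: the statement is the Claim_ definition above) =====
theorem zgodne_spec : Claim_equal_zgodne := by
  intro a b _ ⟨ha, hb⟩
  unfold Spec_zgodne zgodne zgodne_alt
  rw [zgodneLoop1_eq a.toNat a 0 rfl ha, zgodneLoop2_eq b.toNat b _ rfl hb,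
      zgodneAltLoop1_eq a.toNat a 0 rfl ha, zgodneAltLoop2_eq b.toNat b _ rfl hb]
  split_ifs with h <;> simp <;> omega
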